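-- pv_equiv track=rewrite | github.com/ksabhinav/projectfiner | public/slbc-data/scrape_portal_mn_mz_me.py | rows_to_long
-- ===== SOURCE A (Python) =====
-- ID_KEYWORDS = {"sl", "no.", "no ", "serial", "district", "block", "bank",
--                "state", "area", "name", "region", "zone", "branch"}
--
-- def is_id_col(header):
--     h = header.lower()
--     return any(kw in h for kw in ID_KEYWORDS)
--
-- def rows_to_long(rows, state_code, state_name, report_key, report_name, quarter, year):
--     """Convert table rows to long-format dicts."""
--     if len(rows) < 2:
--         return []
--     headers = rows[0]
--     result = []
--     for row in rows[1:]: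
--         if len(row) != len(headers):
--             row = row[:len(headers)] + [''] * max(0, len(headers) - len(row))
--
--         # Get district name (first non-serial text column)
--         district = ""
--         for h, v in zip(headers, row):
--             if is_id_col(h) and not any(kw in h.lower() for kw in ("sl", "no.", "serial")):
--                 district = v.strip()
--                 break
--         if not district:
--             # Try second column
--             if len(row) > 1:
--                 district = row[1].strip()
--
--         # Skip total rows
--         if 'total' in district.lower() and ('grand' in district.lower() or district.lower().strip() == 'total'):
--             continue
--
--         for h, v in zip(headers, row):
--             if is_id_col(h):
--                 continue
--             v = v.strip()
--             if not v:
--                 continue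
--             result.append({
--                 "state_code": state_code,
--                 "state_name": state_name,
--                 "report_key": report_key,
--                 "report_name": report_name,
--                 "level": "district",
--                 "fiscal_year": year,
--                 "quarter": quarter,
--                 "district": district,
--                 "block": "",
--                 "bank": "",
--                 "metric": h.strip(),
--                 "value": v,
--             })
--     return result
-- ===== SOURCE B (Python) =====
-- ID_KEYWORDS = {"sl", "no.", "no ", "serial", "district", "block", "bank",
--                "state", "area", "name", "region", "zone", "branch"}
--
-- def is_id_col(header):
--     h = header.lower()
--     return any(kw in h for kw in ID_KEYWORDS)
--
-- def rows_to_long(rows, state_code, state_name, report_key, report_name, quarter, year):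
--     """Convert table rows to long-format dicts (header metadata precomputed once)."""
--     if len(rows) < 2:
--         return []
--     headers = rows[0]
--     H = len(headers)
--     district_idx = next((i for i, h in enumerate(headers)
--                          if is_id_col(h) and not any(kw in h.lower() for kw in ("sl", "no.", "serial"))),
--                         None)
--     metric_cols = [(i, h.strip()) for i, h in enumerate(headers) if not is_id_col(h)]
--     result = []
--     for raw in rows[1:]:
--         row = raw[:H] + [''] * (H - len(raw))
--         district = row[district_idx].strip() if district_idx is not None else ""
--         if not district and H > 1:
--             district = row[1].strip()
--         dl = district.lower()
--         if 'total' in dl and ('grand' in dl or dl.strip() == 'total'):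
--             continue
--         for i, hs in metric_cols:
--             v = row[i].strip()
--             if v:
--                 result.append({
--                     "state_code": state_code,
--                     "state_name": state_name,
--                     "report_key": report_key,
--                     "report_name": report_name,
--                     "level": "district",
--                     "fiscal_year": year,
--                     "quarter": quarter,
--                     "district": district,
--                     "block": "",
--                     "bank": "",
--                     "metric": hs,
--                     "value": v,
--                 })
--     return result
-- ===== Notes on version B (the rewrite author's own statement) =====
-- stated objective: alternative
-- what changed: Headers are scanned once up front to precompute the district column index (findIdx?) and the list of (index, stripped-header) metric columns, so each row is processed by indexed table lookup instead of re-running the district-search loop and per-cell is_id_col keyword scans.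
import Mathlib
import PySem

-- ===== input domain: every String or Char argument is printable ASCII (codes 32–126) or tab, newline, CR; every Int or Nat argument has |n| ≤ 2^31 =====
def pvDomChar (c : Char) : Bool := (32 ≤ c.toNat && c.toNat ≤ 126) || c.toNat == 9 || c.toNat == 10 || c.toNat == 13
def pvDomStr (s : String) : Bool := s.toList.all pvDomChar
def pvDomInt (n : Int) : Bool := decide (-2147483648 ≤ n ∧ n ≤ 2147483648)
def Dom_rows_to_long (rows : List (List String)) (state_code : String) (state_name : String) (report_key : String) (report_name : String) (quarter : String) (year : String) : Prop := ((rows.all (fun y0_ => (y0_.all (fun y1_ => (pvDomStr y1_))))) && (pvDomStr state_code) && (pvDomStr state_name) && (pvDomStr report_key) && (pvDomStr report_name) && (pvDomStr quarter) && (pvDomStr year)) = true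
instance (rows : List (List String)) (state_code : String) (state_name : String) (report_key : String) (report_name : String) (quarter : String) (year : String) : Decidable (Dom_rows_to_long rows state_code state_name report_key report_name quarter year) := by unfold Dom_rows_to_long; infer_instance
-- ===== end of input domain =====

-- B precomputes the district column index and the metric columns from the headers once,
-- then processes each row by indexed table lookup (alternative decomposition; return value proved equal).

-- ===== PORT A =====
def idKeywords : List String := ["sl", "no.", "no ", "serial", "district", "block", "bank", "state", "area", "name", "region", "zone", "branch"]

def is_id_col (header : String) : Bool :=
  idKeywords.any (fun kw => PySem.Str.isIn kw (PySem.Str.lower header))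

def serialLike (h : String) : Bool :=
  (["sl", "no.", "serial"] : List String).any (fun kw => PySem.Str.isIn kw (PySem.Str.lower h))

def mkRec (state_code state_name report_key report_name quarter year district metric value : String) : List (String × String) :=
  [("state_code", state_code), ("state_name", state_name), ("report_key", report_key),
   ("report_name", report_name), ("level", "district"), ("fiscal_year", year),
   ("quarter", quarter), ("district", district), ("block", ""), ("bank", ""),
   ("metric", metric), ("value", value)]

-- A's per-row district search: first id-column that is not serial-like, break even on empty value.
def findDistrictA : List (String × String) → String
  | [] => ""
  | (h, v) :: rest =>
      if is_id_col h && !(serialLike h) then PySem.Str.strip v else findDistrictA rest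

def rows_to_long (rows : List (List String)) (state_code : String) (state_name : String) (report_key : String) (report_name : String) (quarter : String) (year : String) : List (List (String × String)) :=
  match rows with
  | [] => []
  | [_] => []
  | headers :: body =>
      body.foldl (fun result row0 =>
        let row := if row0.length = headers.length then row0
                   else row0.take headers.length ++ List.replicate (headers.length - row0.length) ""
        let district := findDistrictA (headers.zip row)
        let district := if district = "" then
                          (if row.length > 1 then PySem.Str.strip (row.getD 1 "") else district)
                        else district
        let dl := PySem.Str.lower district
        if PySem.Str.isIn "total" dl && (PySem.Str.isIn "grand" dl || PySem.Str.strip dl = "total") then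
          result
        else
          (headers.zip row).foldl (fun acc hv =>
            if is_id_col hv.1 then acc
            else
              let v := PySem.Str.strip hv.2
              if v = "" then acc
              else acc ++ [mkRec state_code state_name report_key report_name quarter year district (PySem.Str.strip hv.1) v]) result) []

-- ===== PORT B =====
def rows_to_long_alt (rows : List (List String)) (state_code : String) (state_name : String) (report_key : String) (report_name : String) (quarter : String) (year : String) : List (List (String × String)) :=
  if rows.length < 2 then []
  else
      let headers := rows.headD []
      let body := rows.tail
      let H := headers.length
      let districtIdx : Option Nat := headers.findIdx? (fun h => is_id_col h && !(serialLike h))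
      let metricCols : List (Nat × String) :=
        (headers.zipIdx).filterMap (fun hi => if is_id_col hi.1 then none else some (hi.2, PySem.Str.strip hi.1))
      body.foldl (fun result raw =>
        let row := raw.take H ++ List.replicate (H - raw.length) ""
        let district := match districtIdx with
                        | some i => PySem.Str.strip (row.getD i "")
                        | none => ""
        let district := if district = "" && H > 1 then PySem.Str.strip (row.getD 1 "") else district
        let dl := PySem.Str.lower district
        if PySem.Str.isIn "total" dl && (PySem.Str.isIn "grand" dl || PySem.Str.strip dl = "total") then
          result
        else
          result ++ metricCols.filterMap (fun ihs =>
            let v := PySem.Str.strip (row.getD ihs.1 "")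
            if v = "" then none
            else some (mkRec state_code state_name report_key report_name quarter year district ihs.2 v))) []

-- ===== PRECONDITION & SPEC =====
def Spec_rows_to_long (rows : List (List String)) (state_code : String) (state_name : String) (report_key : String) (report_name : String) (quarter : String) (year : String) (out : List (List (String × String))) : Prop := out = rows_to_long_alt rows state_code state_name report_key report_name quarter year
instance (rows : List (List String)) (state_code : String) (state_name : String) (report_key : String) (report_name : String) (quarter : String) (year : String) (out : List (List (String × String))) : Decidable (Spec_rows_to_long rows state_code state_name report_key report_name quarter year out) := by unfold Spec_rows_to_long; infer_instance

-- ===== CLAIM (what is proved, stated in full; the proofs are below) =====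
def Claim_equal_rows_to_long : Prop := ∀ (rows : List (List String)) (state_code : String) (state_name : String) (report_key : String) (report_name : String) (quarter : String) (year : String), Dom_rows_to_long rows state_code state_name report_key report_name quarter year → Spec_rows_to_long rows state_code state_name report_key report_name quarter year (rows_to_long rows state_code state_name report_key report_name quarter year)

-- ===== LEMMAS AND PROOFS =====

-- A's conditional padding equals B's unconditional one.
lemma pad_eq (row0 : List String) (H : Nat) :
    (if row0.length = H then row0 else row0.take H ++ List.replicate (H - row0.length) "")
      = row0.take H ++ List.replicate (H - row0.length) "" := by
  split
  · rename_i h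
    simp [h, List.take_of_length_le (le_of_eq h)]
  · rfl

-- the padded row has exactly the headers' length
lemma padded_length_eq (row0 : List String) (H : Nat) :
    (row0.take H ++ List.replicate (H - row0.length) "").length = H := by
  simp [List.length_take, List.length_replicate]
  omega

-- A's set-then-fallback district assignment as a single conditional.
lemma fallback_eq (d1 x : String) (H : Nat) :
    (if d1 = "" then (if H > 1 then x else d1) else d1)
      = (if (d1 = "" && decide (H > 1)) = true then x else d1) := by
  by_cases h1 : d1 = "" <;> by_cases h2 : H > 1 <;> simp [h1, h2]

-- A's district-search loop over the zipped row equals B's indexed lookup via findIdx?.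
lemma findDistrictA_eq (hs vs : List String) (hlen : vs.length = hs.length) :
    findDistrictA (hs.zip vs)
      = match hs.findIdx? (fun h => is_id_col h && !(serialLike h)) with
        | some i => PySem.Str.strip (vs.getD i "")
        | none => "" := by
  induction hs generalizing vs with
  | nil =>
      have : vs = [] := List.eq_nil_of_length_eq_zero (by simpa using hlen)
      simp [this, findDistrictA]
  | cons h t ih =>
      cases vs with
      | nil => simp at hlen
      | cons v vt =>
          have hlen' : vt.length = t.length := by simpa using hlen
          rw [List.zip_cons_cons, List.findIdx?_cons]
          by_cases hp : (is_id_col h && !(serialLike h)) = true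
          · simp [findDistrictA, hp]
          · rw [if_neg hp]
            simp only [findDistrictA, hp]
            rw [ih vt hlen']
            cases hfi : t.findIdx? (fun h => is_id_col h && !(serialLike h)) with
            | none => simp
            | some i => simp [List.getD]

-- A's per-row emit loop over the zipped row equals appending B's filterMap over the metric
-- columns, stated with an arbitrary start index n and the full row so the induction goes through.
lemma emit_eq (sc sn rk rn q y d : String) (hs : List String) :
    ∀ (n : Nat) (vsFull : List String) (acc : List (List (String × String))),
    n + hs.length ≤ vsFull.length →
    (hs.zip (vsFull.drop n)).foldl (fun acc hv =>
        if is_id_col hv.1 then acc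
        else
          if PySem.Str.strip hv.2 = "" then acc
          else acc ++ [mkRec sc sn rk rn q y d (PySem.Str.strip hv.1) (PySem.Str.strip hv.2)]) acc
      = acc ++ ((hs.zipIdx n).filterMap (fun hi => if is_id_col hi.1 then none else some (hi.2, PySem.Str.strip hi.1))).filterMap
          (fun ihs =>
            if PySem.Str.strip (vsFull.getD ihs.1 "") = "" then none
            else some (mkRec sc sn rk rn q y d ihs.2 (PySem.Str.strip (vsFull.getD ihs.1 "")))) := by
  induction hs with
  | nil => intro n vsFull acc _; simp
  | cons h t ih =>
      intro n vsFull acc hlen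
      have hn : n < vsFull.length := by simp at hlen; omega
      have hdrop : vsFull.drop n = vsFull[n] :: vsFull.drop (n + 1) :=
        List.drop_eq_getElem_cons hn
      have hv : vsFull.getD n "" = vsFull[n] := by
        simp [List.getD, List.getElem?_eq_getElem hn]
      have hle : n + 1 + t.length ≤ vsFull.length := by simp at hlen; omega
      rw [hdrop, List.zip_cons_cons, List.zipIdx_cons]
      simp only [List.foldl_cons, List.filterMap_cons]
      by_cases hid : is_id_col h = true
      · simp only [hid, if_true]
        exact ih (n + 1) vsFull acc hle
      · simp only [hid, if_false, Bool.false_eq_true]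
        by_cases hve : PySem.Str.strip vsFull[n] = ""
        · simp only [List.filterMap_cons, hv, hve]
          exact ih (n + 1) vsFull acc hle
        · simp only [List.filterMap_cons, hv, if_neg hve]
          rw [ih (n + 1) vsFull (acc ++ [mkRec sc sn rk rn q y d (PySem.Str.strip h) (PySem.Str.strip vsFull[n])]) hle]
          rw [List.append_assoc]
          rfl

lemma foldl_fun_congr {α β : Type} (f g : β → α → β) (init : β) (l : List α)
    (h : ∀ b a, f b a = g b a) : l.foldl f init = l.foldl g init := by
  induction l generalizing init with
  | nil => rfl
  | cons x xs ih => simp only [List.foldl_cons, h, ih]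

-- emit_eq at start index 0 over the whole padded row
lemma emit_eq0 (sc sn rk rn q y d : String) (hs vs : List String)
    (acc : List (List (String × String))) (h : hs.length ≤ vs.length) :
    (hs.zip vs).foldl (fun acc hv =>
        if is_id_col hv.1 then acc
        else
          if PySem.Str.strip hv.2 = "" then acc
          else acc ++ [mkRec sc sn rk rn q y d (PySem.Str.strip hv.1) (PySem.Str.strip hv.2)]) acc
      = acc ++ ((hs.zipIdx).filterMap (fun hi => if is_id_col hi.1 then none else some (hi.2, PySem.Str.strip hi.1))).filterMap
          (fun ihs =>
            if PySem.Str.strip (vs.getD ihs.1 "") = "" then none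
            else some (mkRec sc sn rk rn q y d ihs.2 (PySem.Str.strip (vs.getD ihs.1 "")))) := by
  have := emit_eq sc sn rk rn q y d hs 0 vs acc (by omega)
  simpa using this

-- ===== VERDICT (by name: the statement is the Claim_ definition above) =====
set_option maxHeartbeats 1000000 in
theorem rows_to_long_spec : Claim_equal_rows_to_long := by
  intro rows sc sn rk rn q y _
  unfold Spec_rows_to_long rows_to_long rows_to_long_alt
  cases rows with
  | nil => rfl
  | cons headers rest =>
  cases rest with
  | nil => rfl
  | cons b body' =>
    rw [if_neg (by simp)]
    simp only [List.headD_cons, List.tail_cons]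
    refine foldl_fun_congr _ _ _ _ ?_
    intro result row0
    rw [pad_eq]
    have hlen := padded_length_eq row0 headers.length
    rw [findDistrictA_eq headers _ hlen, hlen, fallback_eq]
    rw [emit_eq0 sc sn rk rn q y _ headers
      (row0.take headers.length ++ List.replicate (headers.length - row0.length) "") result
      (by rw [hlen])]
    rfl
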